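-- pv_equiv track=rewrite | github.com/alexxschulzz/Deployment-Architecture-Analysis-Framework | Resources/Microservices/graphAnalysis/graphAnalysis.py | create_graphs
-- ===== SOURCE A (Python) =====
-- def create_graphs(relationships):
--     graphs = []
--     visited = set()
--
--     # Help function for depth search
--     def dfs(node, current_graph):
--         for rel in relationships:
--             source, target, relationship = rel
--             if source == node and (source, target, relationship) not in current_graph:
--                 current_graph.append((source, target, relationship))
--                 dfs(target, current_graph)  # Recursion
--
--     for rel in relationships:
--         source, target, relationship = rel
--         if source not in visited:
--             current_graph = []
--             dfs(source, current_graph)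
--             graphs.append(current_graph)
--             visited.update([source] + [target for _, target, _ in current_graph])
--
--     # split up each graph so that a subgraph is created for every outbound relationship of the graph's source node
--     subgraphs = []
--     subgraph_counter = -1
--
--     for graph in graphs:
--         source_node = graph[0][0]
--         for subgraph in graph:
--             if subgraph[0] == source_node:
--                 subgraph_counter += 1
--                 subgraphs.append([])
--                 subgraphs[subgraph_counter].append(subgraph)
--             else:
--                 subgraphs[subgraph_counter].append(subgraph)
--
--     # Remove redudant subgraphs // subgraphs which are also part of another subgraph
--     unique_graphs = []
--     for i, graph in enumerate(subgraphs):
--         is_subgraph = False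
--         for j, other_graph in enumerate(subgraphs):
--             if i != j and set(graph).issubset(set(other_graph)):
--                 is_subgraph = True
--                 break
--         if not is_subgraph:
--             unique_graphs.append(graph)
--
--     return unique_graphs
-- ===== SOURCE B (Python) =====
-- # B: same three phases, but the recursive DFS is replaced by an iterative DFS with an
-- # explicit stack of [node, scan-index] frames reproducing the recursion's exact
-- # pre-order edge-append order and per-edge dedup; the split pass emits each graph's
-- # chunks locally and concatenates them; the subset-removal pass is a comprehension.
-- def create_graphs(relationships):
--     graphs = []
--     visited = set()
--
--     def dfs(start):
--         graph = []
--         stack = [[start, 0]]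
--         while stack:
--             frame = stack[-1]
--             node, i = frame
--             while i < len(relationships):
--                 rel = relationships[i]
--                 if rel[0] == node and rel not in graph:
--                     break
--                 i += 1
--             if i == len(relationships):
--                 stack.pop()
--             else:
--                 rel = relationships[i]
--                 graph.append(rel)
--                 frame[1] = i + 1
--                 stack.append([rel[1], 0])
--         return graph
--
--     for source, target, relationship in relationships:
--         if source not in visited:
--             graph = dfs(source)
--             graphs.append(graph)
--             visited.update([source] + [t for _, t, _ in graph])
--
--     # split each graph into chunks headed by the source node's outbound edges
--     subgraphs = []
--     for graph in graphs:
--         source_node = graph[0][0]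
--         current = []
--         for edge in graph:
--             if edge[0] == source_node and current:
--                 subgraphs.append(current)
--                 current = [edge]
--             else:
--                 current.append(edge)
--         subgraphs.append(current)
--
--     # keep only subgraphs not contained (as edge sets) in another subgraph
--     return [g for i, g in enumerate(subgraphs)
--             if not any(i != j and set(g) <= set(other)
--                        for j, other in enumerate(subgraphs))]
-- ===== Notes on version B (the rewrite author's own statement) =====
-- stated objective: alternative
-- what changed: The recursive DFS is replaced by an iterative DFS over an explicit stack of (node, scan-index) frames that reproduces the recursion's pre-order edge ordering and per-edge dedup; the split pass builds each graph's chunks locally and concatenates them instead of mutating a global counter-indexed list; the subset-removal pass becomes an enumerate/any comprehension.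
import Mathlib
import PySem

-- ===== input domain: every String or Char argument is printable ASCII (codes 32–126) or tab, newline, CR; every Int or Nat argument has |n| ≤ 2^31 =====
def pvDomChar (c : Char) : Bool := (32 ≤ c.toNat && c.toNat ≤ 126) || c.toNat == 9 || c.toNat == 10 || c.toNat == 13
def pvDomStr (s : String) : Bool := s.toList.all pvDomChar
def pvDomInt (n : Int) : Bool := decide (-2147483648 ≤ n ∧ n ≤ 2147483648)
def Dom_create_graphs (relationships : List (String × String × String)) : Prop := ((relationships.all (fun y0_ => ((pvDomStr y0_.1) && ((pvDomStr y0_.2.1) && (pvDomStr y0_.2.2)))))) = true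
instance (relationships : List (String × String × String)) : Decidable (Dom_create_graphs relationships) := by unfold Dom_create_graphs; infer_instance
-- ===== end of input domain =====

-- B re-implements A with an explicit-stack DFS (same pre-order, per-edge dedup), a local
-- chunking split pass, and a comprehension-style subset-removal pass; same return value.

-- ===== PORT A =====
-- A's recursive dfs. Fuel is a totality guard only: each recursive call strictly grows the
-- duplicate-free graph with edges drawn from `relationships`, so with the fuel
-- `relationships.length + 1` used by `create_graphs` the 0-fuel branch mirrors a recursion
-- depth the Python never reaches.
mutual
def pvDfsA (rels : List (String × String × String)) :
    Nat → String → List (String × String × String) → List (String × String × String)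
  | 0, _, g => g
  | f + 1, node, g => pvLoopA rels f node rels g
  termination_by f _ _ => (f, 0)

-- the `for rel in relationships` body of A's dfs, scanning the remaining suffix
def pvLoopA (rels : List (String × String × String)) :
    Nat → String → List (String × String × String) → List (String × String × String) →
    List (String × String × String)
  | _, _, [], g => g
  | f, node, r :: rs, g =>
    if r.1 == node && !(g.contains r) then
      pvLoopA rels f node rs (pvDfsA rels f r.2.1 (g ++ [r]))
    else
      pvLoopA rels f node rs g
  termination_by f _ pending _ => (f, pending.length)
end

-- first pass: one dfs per unvisited source, in order
def pvPhase1A (rels : List (String × String × String)) : List (List (String × String × String)) :=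
  (rels.foldl
    (fun (st : List (List (String × String × String)) × PySem.Set String) rel =>
      if !(PySem.Set.contains st.2 rel.1) then
        let g := pvDfsA rels (rels.length + 1) rel.1 []
        (st.1 ++ [g], PySem.Set.update st.2 (rel.1 :: g.map (fun e => e.2.1)))
      else st)
    (([], PySem.Set.empty))).1

-- second pass: A's split loop; `subgraph_counter` always equals `len(subgraphs) - 1`, so
-- `subgraphs[subgraph_counter].append(e)` is "append e to the last chunk".  `graph[0][0]`
-- is ported as headD: phase-1 graphs are never empty (proved below), so the default is idle.
def pvPhase2A (graphs : List (List (String × String × String))) :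
    List (List (String × String × String)) :=
  graphs.foldl
    (fun subs graph =>
      let src := (graph.headD ("", "", "")).1
      graph.foldl
        (fun subs e =>
          if e.1 == src then subs ++ [[e]]
          else subs.dropLast ++ [subs.getLastD [] ++ [e]])
        subs)
    []

-- A's inner `for j, other in enumerate(subgraphs): … break` loop
def pvIsSubA (graph : List (String × String × String)) (i : Nat) :
    Nat → List (List (String × String × String)) → Bool
  | _, [] => false
  | j, other :: rest =>
    if i != j && PySem.Set.issubset (PySem.Set.ofList graph) (PySem.Set.ofList other) then true
    else pvIsSubA graph i (j + 1) rest

-- third pass: A's `for i, graph in enumerate(subgraphs)` loop with `is_subgraph`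
def pvPhase3A (subs : List (List (String × String × String))) :
    List (List (String × String × String)) :=
  (subs.foldl
    (fun (st : List (List (String × String × String)) × Nat) graph =>
      if pvIsSubA graph st.2 0 subs then (st.1, st.2 + 1)
      else (st.1 ++ [graph], st.2 + 1))
    (([], 0))).1

def create_graphs (relationships : List (String × String × String)) :
    List (List (String × String × String)) :=
  pvPhase3A (pvPhase2A (pvPhase1A relationships))

-- ===== PORT B =====
-- B's inner `while i < len(relationships)` scan: first rel of the remaining suffix with
-- source == node that is not yet in the graph, together with the suffix after it
def pvScanB (node : String) (g : List (String × String × String)) :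
    List (String × String × String) →
    Option ((String × String × String) × List (String × String × String))
  | [] => none
  | r :: rs => if r.1 == node && !(g.contains r) then some (r, rs) else pvScanB node g rs

theorem pvMeasArith (L f p t M : Nat) (h : t < p) :
    (L + 2) ^ f * (L + 1) + ((L + 2) ^ (f + 1) * (t + 1) + M) < (L + 2) ^ (f + 1) * (p + 1) + M := by
  have hk : 0 < (L + 2) ^ f := pow_pos (by omega) f
  have h1 : (L + 2) ^ (f + 1) = (L + 2) ^ f * (L + 2) := pow_succ _ _
  nlinarith [Nat.mul_le_mul_left ((L + 2) ^ (f + 1)) (show t + 1 ≤ p by omega)]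

theorem pvScanB_length {node : String} {g : List (String × String × String)}
    {pending rest : List (String × String × String)} {r : String × String × String}
    (h : pvScanB node g pending = some (r, rest)) : rest.length < pending.length := by
  induction pending generalizing rest r with
  | nil => simp [pvScanB] at h
  | cons x xs ih =>
    rw [pvScanB] at h
    split at h
    · cases h; simp
    · have := ih h
      simp
      omega

-- B's `while stack` loop.  A frame holds the current node and the not-yet-scanned suffix of
-- `relationships` (the Python index i, as a suffix).  Each frame carries a fuel budget — a
-- termination guard for the descent, decremented on push; `create_graphs_alt` starts with
-- budget `relationships.length`, matching the Python, whose descent depth is bounded by the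
-- number of distinct relationships.
def pvRunB (rels : List (String × String × String)) :
    List (Nat × String × List (String × String × String)) →
    List (String × String × String) → List (String × String × String)
  | [], g => g
  | (f, node, pending) :: S, g =>
    match _h : pvScanB node g pending with
    | none => pvRunB rels S g
    | some (r, rest) =>
      match f with
      | 0 => pvRunB rels ((0, node, rest) :: S) (g ++ [r])
      | f' + 1 => pvRunB rels ((f', r.2.1, rels) :: (f' + 1, node, rest) :: S) (g ++ [r])
  termination_by S _ => (S.map (fun fr => (rels.length + 2) ^ fr.1 * (fr.2.2.length + 1))).sum
  decreasing_by
  · have hk : 0 < (rels.length + 2) ^ f * (pending.length + 1) :=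
      Nat.mul_pos (pow_pos (by omega) f) (Nat.succ_pos _)
    simp only [List.map_cons, List.sum_cons]
    linarith
  · have := pvScanB_length _h
    simp only [List.map_cons, List.sum_cons, pow_zero, one_mul]
    omega
  · have := pvScanB_length _h
    simp only [List.map_cons, List.sum_cons, Nat.succ_eq_add_one]
    have := pvMeasArith rels.length f' pending.length rest.length
      ((List.map (fun fr => (rels.length + 2) ^ fr.1 * (fr.2.2.length + 1)) S).sum) this
    linarith

def pvDfsB (rels : List (String × String × String)) (start : String) :
    List (String × String × String) :=
  pvRunB rels [(rels.length, start, rels)] []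

def pvPhase1B (rels : List (String × String × String)) : List (List (String × String × String)) :=
  (rels.foldl
    (fun (st : List (List (String × String × String)) × PySem.Set String) rel =>
      if !(PySem.Set.contains st.2 rel.1) then
        let g := pvDfsB rels rel.1
        (st.1 ++ [g], PySem.Set.update st.2 (rel.1 :: g.map (fun e => e.2.1)))
      else st)
    (([], PySem.Set.empty))).1

-- B's split of one graph into chunks, local state (finished chunks, current chunk)
def pvSplitB (src : String) (graph : List (String × String × String)) :
    List (List (String × String × String)) :=
  let st := graph.foldl
    (fun (st : List (List (String × String × String)) × List (String × String × String)) e =>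
      if e.1 == src && !st.2.isEmpty then (st.1 ++ [st.2], [e]) else (st.1, st.2 ++ [e]))
    (([], []))
  st.1 ++ [st.2]

def pvPhase2B (graphs : List (List (String × String × String))) :
    List (List (String × String × String)) :=
  graphs.flatMap (fun g => pvSplitB (g.headD ("", "", "")).1 g)

-- B's final comprehension over enumerate(subgraphs) with an inner any(…)
def pvPhase3B (subs : List (List (String × String × String))) :
    List (List (String × String × String)) :=
  ((PySem.List.enumerate subs).filter
    (fun p =>
      !((PySem.List.enumerate subs).any
        (fun q =>
          p.1 != q.1 && PySem.Set.issubset (PySem.Set.ofList p.2) (PySem.Set.ofList q.2))))).map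
    (fun p => p.2)

def create_graphs_alt (relationships : List (String × String × String)) :
    List (List (String × String × String)) :=
  pvPhase3B (pvPhase2B (pvPhase1B relationships))

-- ===== PRECONDITION & SPEC =====
def Spec_create_graphs (relationships : List (String × String × String)) (out : List (List (String × String × String))) : Prop := out = create_graphs_alt relationships
instance (relationships : List (String × String × String)) (out : List (List (String × String × String))) : Decidable (Spec_create_graphs relationships out) := by unfold Spec_create_graphs; infer_instance

-- ===== CLAIM (what is proved, stated in full; the proofs are below) =====
def Claim_equal_create_graphs : Prop := ∀ (relationships : List (String × String × String)), Dom_create_graphs relationships → Spec_create_graphs relationships (create_graphs relationships)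

-- ===== LEMMAS AND PROOFS =====

-- ---- DFS: A's recursion vs B's stack machine ----

-- the graph only ever grows (A side)
theorem pvLoopA_prefix_of (rels : List (String × String × String)) (f : Nat)
    (hd : ∀ node g, g <+: pvDfsA rels f node g) :
    ∀ node pending g, g <+: pvLoopA rels f node pending g := by
  intro node pending
  induction pending with
  | nil => intro g; rw [pvLoopA]
  | cons r rs ih =>
    intro g
    rw [pvLoopA]
    split
    · exact (List.prefix_append g [r]).trans ((hd r.2.1 (g ++ [r])).trans (ih _))
    · exact ih g

theorem pvDfsA_prefix (rels : List (String × String × String)) :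
    ∀ f node g, g <+: pvDfsA rels f node g := by
  intro f
  induction f with
  | zero => intro node g; rw [pvDfsA]
  | succ f ih => intro node g; rw [pvDfsA]; exact pvLoopA_prefix_of rels f ih node rels g

theorem pvLoopA_prefix (rels : List (String × String × String)) (f : Nat) :
    ∀ node pending g, g <+: pvLoopA rels f node pending g :=
  pvLoopA_prefix_of rels f (pvDfsA_prefix rels f)

-- a source with an outbound relationship yields a nonempty graph
theorem pvLoopA_ne_nil (rels : List (String × String × String)) (f : Nat) (node : String) :
    ∀ pending, (∃ r ∈ pending, r.1 = node) → pvLoopA rels f node pending [] ≠ [] := by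
  intro pending
  induction pending with
  | nil => rintro ⟨r, hr, -⟩; exact absurd hr (List.not_mem_nil)
  | cons x xs ih =>
    rintro ⟨r, hr, hr1⟩
    rw [pvLoopA]
    by_cases hc : (x.1 == node && !(([] : List (String × String × String)).contains x)) = true
    · rw [if_pos hc]
      have h1 : [x] <+: pvLoopA rels f node xs (pvDfsA rels f x.2.1 ([] ++ [x])) :=
        (pvDfsA_prefix rels f x.2.1 ([] ++ [x])).trans (pvLoopA_prefix rels f node xs _)
      intro h0
      rw [h0, List.prefix_nil] at h1
      exact absurd h1 (by simp)
    · rw [if_neg hc]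
      apply ih
      rcases List.mem_cons.1 hr with rfl | hr'
      · exact absurd (by simp [hr1]) hc
      · exact ⟨r, hr', hr1⟩

-- the scan finds nothing ↔ the loop body never fires
theorem pvScanB_none (rels : List (String × String × String)) (f : Nat) {node : String}
    {g pending : List (String × String × String)}
    (h : pvScanB node g pending = none) : pvLoopA rels f node pending g = g := by
  induction pending with
  | nil => rw [pvLoopA]
  | cons x xs ih =>
    rw [pvScanB] at h
    rw [pvLoopA]
    split at h
    · exact absurd h (by simp)
    · rename_i hc
      rw [if_neg hc]
      exact ih h

-- the scan's first hit is the loop's first executed body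
theorem pvScanB_some (rels : List (String × String × String)) (f : Nat) {node : String}
    {g pending rest : List (String × String × String)} {r : String × String × String}
    (h : pvScanB node g pending = some (r, rest)) :
    pvLoopA rels f node pending g = pvLoopA rels f node rest (pvDfsA rels f r.2.1 (g ++ [r])) := by
  induction pending with
  | nil => simp [pvScanB] at h
  | cons x xs ih =>
    rw [pvScanB] at h
    rw [pvLoopA]
    split at h
    · rename_i hc
      obtain ⟨rfl, rfl⟩ : x = r ∧ xs = rest := by
        injection h with h'; injection h' with h1 h2; exact ⟨h1, h2⟩
      rw [if_pos hc]
    · rename_i hc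
      rw [if_neg hc]
      exact ih h

-- measure helper for the bisimulation induction
theorem pvMeasTail (k t p M : Nat) (hk : 0 < k) (h : t < p) :
    k * (t + 1) + M + 1 ≤ k * (p + 1) + M := by
  have := Nat.mul_le_mul_left k (show t + 1 + 1 ≤ p + 1 by omega)
  nlinarith

-- BISIMULATION: one stack frame computes exactly A's loop on its suffix
theorem pvBisim (rels : List (String × String × String)) :
    ∀ (n f : Nat) (node : String) (pending : List (String × String × String))
      (S : List (Nat × String × List (String × String × String)))
      (g : List (String × String × String)),
      (List.map (fun fr => (rels.length + 2) ^ fr.1 * (fr.2.2.length + 1))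
          ((f, node, pending) :: S)).sum ≤ n →
      pvRunB rels ((f, node, pending) :: S) g = pvRunB rels S (pvLoopA rels f node pending g) := by
  intro n
  induction n with
  | zero =>
    intro f node pending S g hm
    exfalso
    have : 0 < (rels.length + 2) ^ f * (pending.length + 1) :=
      Nat.mul_pos (pow_pos (by omega) f) (Nat.succ_pos _)
    simp only [List.map_cons, List.sum_cons] at hm
    omega
  | succ n ih =>
    intro f node pending S g hm
    simp only [List.map_cons, List.sum_cons] at hm
    rw [pvRunB]
    cases hscan : pvScanB node g pending with
    | none =>
      rw [pvScanB_none rels f hscan]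
    | some pr =>
      obtain ⟨r, rest⟩ := pr
      have hlen := pvScanB_length hscan
      cases f with
      | zero =>
        show pvRunB rels ((0, node, rest) :: S) (g ++ [r])
          = pvRunB rels S (pvLoopA rels 0 node pending g)
        rw [ih 0 node rest S (g ++ [r]) (by
          simp only [List.map_cons, List.sum_cons, pow_zero, one_mul] at *
          omega)]
        rw [pvScanB_some rels 0 hscan]
        rw [pvDfsA]
      | succ f' =>
        have hpos : 0 < (rels.length + 2) ^ (f' + 1) := pow_pos (by omega) _
        show pvRunB rels ((f', r.2.1, rels) :: (f' + 1, node, rest) :: S) (g ++ [r])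
          = pvRunB rels S (pvLoopA rels (f' + 1) node pending g)
        rw [ih f' r.2.1 rels ((f' + 1, node, rest) :: S) (g ++ [r]) (by
          simp only [List.map_cons, List.sum_cons]
          have := pvMeasArith rels.length f' pending.length rest.length
            ((List.map (fun fr => (rels.length + 2) ^ fr.1 * (fr.2.2.length + 1)) S).sum) hlen
          omega)]
        rw [ih (f' + 1) node rest S (pvLoopA rels f' r.2.1 rels (g ++ [r])) (by
          simp only [List.map_cons, List.sum_cons]
          have := pvMeasTail ((rels.length + 2) ^ (f' + 1)) rest.length pending.length
            ((List.map (fun fr => (rels.length + 2) ^ fr.1 * (fr.2.2.length + 1)) S).sum) hpos hlen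
          omega)]
        rw [pvScanB_some rels (f' + 1) hscan]
        rw [pvDfsA]

theorem pvDfsB_eq (rels : List (String × String × String)) (node : String) :
    pvDfsB rels node = pvDfsA rels (rels.length + 1) node [] := by
  unfold pvDfsB
  rw [pvBisim rels _ rels.length node rels [] [] le_rfl]
  rw [pvRunB, pvDfsA]

-- ---- phase 1 ----

theorem pvPhase1_eq (rels : List (String × String × String)) :
    pvPhase1B rels = pvPhase1A rels := by
  unfold pvPhase1A pvPhase1B
  simp only [pvDfsB_eq]

theorem pvPhase1A_aux_ne_nil (rels : List (String × String × String)) :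
    ∀ (l : List (String × String × String))
      (st : List (List (String × String × String)) × PySem.Set String),
      (∀ g ∈ st.1, g ≠ []) → (∀ r ∈ l, r ∈ rels) →
      ∀ g ∈ (l.foldl
        (fun (st : List (List (String × String × String)) × PySem.Set String) rel =>
          if !(PySem.Set.contains st.2 rel.1) then
            let g := pvDfsA rels (rels.length + 1) rel.1 []
            (st.1 ++ [g], PySem.Set.update st.2 (rel.1 :: g.map (fun e => e.2.1)))
          else st) st).1, g ≠ [] := by
  intro l
  induction l with
  | nil => intro st h _; exact h
  | cons r rs ih =>
    intro st h hsub
    rw [List.foldl_cons]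
    apply ih
    · intro g hg
      by_cases hc : (!(PySem.Set.contains st.2 r.1)) = true
      · rw [if_pos hc] at hg
        simp only [List.mem_append, List.mem_singleton] at hg
        rcases hg with hg | rfl
        · exact h g hg
        · rw [pvDfsA]
          exact pvLoopA_ne_nil rels rels.length r.1 rels ⟨r, hsub r (by simp), rfl⟩
      · rw [if_neg hc] at hg
        exact h g hg
    · intro x hx
      exact hsub x (by simp [hx])

theorem pvPhase1A_ne_nil (rels : List (String × String × String)) :
    ∀ g ∈ pvPhase1A rels, g ≠ [] := by
  unfold pvPhase1A
  exact pvPhase1A_aux_ne_nil rels rels ([], PySem.Set.empty) (by simp) (fun r hr => hr)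

-- ---- phase 2 ----

-- A's counter loop and B's chunk state walk in lockstep over one graph
theorem pvSplit_rel (src : String) :
    ∀ (rest : List (String × String × String))
      (subs chunks : List (List (String × String × String)))
      (cur : List (String × String × String)), cur ≠ [] →
      rest.foldl
        (fun subs e =>
          if e.1 == src then subs ++ [[e]]
          else subs.dropLast ++ [subs.getLastD [] ++ [e]])
        (subs ++ (chunks ++ [cur]))
      = subs ++
          ((rest.foldl
            (fun (st : List (List (String × String × String)) × List (String × String × String)) e =>
              if e.1 == src && !st.2.isEmpty then (st.1 ++ [st.2], [e]) else (st.1, st.2 ++ [e]))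
            (chunks, cur)).1
          ++ [(rest.foldl
            (fun (st : List (List (String × String × String)) × List (String × String × String)) e =>
              if e.1 == src && !st.2.isEmpty then (st.1 ++ [st.2], [e]) else (st.1, st.2 ++ [e]))
            (chunks, cur)).2]) := by
  intro rest
  induction rest with
  | nil => intro subs chunks cur _; simp
  | cons e es ih =>
    intro subs chunks cur hcur
    simp only [List.foldl_cons]
    by_cases hc : (e.1 == src) = true
    · have hb : (e.1 == src && !cur.isEmpty) = true := by
        simp [hc, hcur]
      rw [if_pos hc, if_pos hb]
      have hassoc : (subs ++ (chunks ++ [cur])) ++ [[e]] = subs ++ ((chunks ++ [cur]) ++ [[e]]) := by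
        simp
      rw [hassoc]
      exact ih subs (chunks ++ [cur]) [e] (by simp)
    · have hb : (e.1 == src && !cur.isEmpty) = false := by simp [hc]
      rw [if_neg hc, hb]
      simp only [Bool.false_eq_true, if_false]
      have h1 : subs ++ (chunks ++ [cur]) = (subs ++ chunks) ++ [cur] := by simp
      rw [h1, List.dropLast_concat, List.getLastD_concat]
      have h2 : (subs ++ chunks) ++ [cur ++ [e]] = subs ++ (chunks ++ [cur ++ [e]]) := by simp
      rw [h2]
      exact ih subs chunks (cur ++ [e]) (by simp)

theorem pvPhase2_graph (g : List (String × String × String)) (hg : g ≠ [])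
    (subs : List (List (String × String × String))) :
    g.foldl
      (fun subs e =>
        if e.1 == (g.headD ("", "", "")).1 then subs ++ [[e]]
        else subs.dropLast ++ [subs.getLastD [] ++ [e]])
      subs
    = subs ++ pvSplitB (g.headD ("", "", "")).1 g := by
  obtain ⟨e, rest, rfl⟩ := List.exists_cons_of_ne_nil hg
  unfold pvSplitB
  simp only [List.headD_cons, List.foldl_cons, beq_self_eq_true, if_pos, List.isEmpty_nil,
    Bool.not_true, Bool.and_false, Bool.false_eq_true, if_false, List.nil_append]
  have := pvSplit_rel e.1 rest subs [] [e] (by simp)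
  simpa using this

theorem pvPhase2_aux (graphs : List (List (String × String × String))) :
    ∀ (subs : List (List (String × String × String))), (∀ g ∈ graphs, g ≠ []) →
      graphs.foldl
        (fun subs graph =>
          let src := (graph.headD ("", "", "")).1
          graph.foldl
            (fun subs e =>
              if e.1 == src then subs ++ [[e]]
              else subs.dropLast ++ [subs.getLastD [] ++ [e]])
            subs)
        subs
      = subs ++ pvPhase2B graphs := by
  induction graphs with
  | nil => intro subs _; simp [pvPhase2B]
  | cons g gs ih =>
    intro subs h
    rw [List.foldl_cons]
    simp only
    rw [pvPhase2_graph g (h g (by simp)) subs]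
    rw [ih (subs ++ pvSplitB (g.headD ("", "", "")).1 g) (fun x hx => h x (by simp [hx]))]
    simp [pvPhase2B]

theorem pvPhase2_eq (graphs : List (List (String × String × String)))
    (h : ∀ g ∈ graphs, g ≠ []) : pvPhase2A graphs = pvPhase2B graphs := by
  unfold pvPhase2A
  simpa using pvPhase2_aux graphs [] h

-- ---- phase 3 ----

theorem pvCastBne (i j : Nat) : (((i : Int)) != ((j : Int))) = (i != j) := by
  by_cases h : i = j
  · simp [h]
  · simp [bne, h]

theorem pvIsSubA_eq (subsetOf : List (String × String × String)) (i : Nat) :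
    ∀ (others : List (List (String × String × String))) (j : Nat),
      pvIsSubA subsetOf i j others
      = (PySem.List.enumerate others (j : Int)).any
          (fun q => ((i : Int)) != q.1 &&
            PySem.Set.issubset (PySem.Set.ofList subsetOf) (PySem.Set.ofList q.2)) := by
  intro others
  induction others with
  | nil => intro j; rw [pvIsSubA]; simp [PySem.List.enumerate_nil]
  | cons o os ih =>
    intro j
    rw [pvIsSubA]
    rw [PySem.List.enumerate_cons, List.any_cons]
    have hj : ((j : Int)) + 1 = (((j + 1 : Nat)) : Int) := by push_cast; ring
    rw [hj, ← ih (j + 1)]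
    simp only [pvCastBne]
    by_cases hc : (i != j && PySem.Set.issubset (PySem.Set.ofList subsetOf) (PySem.Set.ofList o)) = true
    · rw [if_pos hc, hc]; simp
    · rw [if_neg hc]
      simp only [Bool.not_eq_true] at hc
      rw [hc]
      simp

theorem pvPhase3_aux (subs : List (List (String × String × String))) :
    ∀ (l : List (List (String × String × String)))
      (acc : List (List (String × String × String))) (i0 : Nat),
      (l.foldl
        (fun (st : List (List (String × String × String)) × Nat) graph =>
          if pvIsSubA graph st.2 0 subs then (st.1, st.2 + 1)
          else (st.1 ++ [graph], st.2 + 1))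
        (acc, i0)).1
      = acc ++ ((PySem.List.enumerate l (i0 : Int)).filter
          (fun p =>
            !((PySem.List.enumerate subs).any
              (fun q => p.1 != q.1 &&
                PySem.Set.issubset (PySem.Set.ofList p.2) (PySem.Set.ofList q.2))))).map
          (fun p => p.2) := by
  intro l
  induction l with
  | nil => intro acc i0; simp [PySem.List.enumerate_nil]
  | cons g gs ih =>
    intro acc i0
    rw [List.foldl_cons]
    have hj : ((i0 : Int)) + 1 = (((i0 + 1 : Nat)) : Int) := by push_cast; ring
    rw [PySem.List.enumerate_cons, hj]
    by_cases hc : pvIsSubA g i0 0 subs = true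
    · rw [if_pos hc]
      rw [ih acc (i0 + 1)]
      rw [pvIsSubA_eq g i0 subs 0] at hc
      simp only [Nat.cast_zero] at hc
      simp [hc]
    · rw [if_neg hc]
      rw [ih (acc ++ [g]) (i0 + 1)]
      simp only [Bool.not_eq_true] at hc
      rw [pvIsSubA_eq g i0 subs 0] at hc
      simp only [Nat.cast_zero] at hc
      simp [hc]

theorem pvPhase3_eq (subs : List (List (String × String × String))) :
    pvPhase3A subs = pvPhase3B subs := by
  unfold pvPhase3A pvPhase3B
  rw [pvPhase3_aux subs subs [] 0]
  simp


-- ===== VERDICT (by name: the statement is the Claim_ definition above) =====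
theorem create_graphs_spec : Claim_equal_create_graphs := by
  intro rels _
  unfold Spec_create_graphs create_graphs create_graphs_alt
  rw [pvPhase1_eq]
  rw [pvPhase2_eq (pvPhase1A rels) (pvPhase1A_ne_nil rels)]
  rw [pvPhase3_eq]
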